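-- pv_equiv track=rewrite | github.com/StockerMC/Emoji-Helper | utils/zip.py | clean_items
-- ===== SOURCE A (Python) =====
-- import collections
--
-- def clean_items(original: list[str]) -> list[str]:
--     out = []
--     counts = collections.Counter()
--     for item in original:
--         count = counts[item]
--         if count != 0:
--             out.append(f"{item}_{count}")
--         else:
--             out.append(item)
--
--         counts[item] += 1
--
--     return out
-- ===== SOURCE B (Python) =====
-- def clean_items(original: list[str]) -> list[str]:
--     positions = {}
--     for i, item in enumerate(original):
--         positions.setdefault(item, []).append(i)
--     result = [""] * len(original)
--     for item, idxs in positions.items():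
--         for k, idx in enumerate(idxs):
--             result[idx] = item if k == 0 else f"{item}_{k}"
--     return result
-- ===== Notes on version B (the rewrite author's own statement) =====
-- stated objective: alternative
-- what changed: Replaces A's single left-to-right pass with a running Counter by a two-stage group-and-scatter: first build an index (item -> list of its positions), then for each distinct item write item/item_k into a preallocated result array at those positions, out of input order.
import Mathlib
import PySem

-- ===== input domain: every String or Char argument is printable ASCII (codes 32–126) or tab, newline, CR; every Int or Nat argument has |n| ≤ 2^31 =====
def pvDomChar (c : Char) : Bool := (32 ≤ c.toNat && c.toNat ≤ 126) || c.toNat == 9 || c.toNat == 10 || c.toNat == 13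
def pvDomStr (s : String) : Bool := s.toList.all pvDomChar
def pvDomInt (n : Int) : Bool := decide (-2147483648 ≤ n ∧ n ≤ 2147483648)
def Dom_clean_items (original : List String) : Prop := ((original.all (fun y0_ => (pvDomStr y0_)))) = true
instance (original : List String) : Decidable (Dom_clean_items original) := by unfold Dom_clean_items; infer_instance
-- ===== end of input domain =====

-- B replaces A's single pass with a running Counter by a two-stage group-and-scatter:
-- group positions per item, then fill a preallocated result array per distinct item (alternative decomposition).


-- ===== PORT A =====
-- literal port of A: foldl maintaining (out, Counter); counts[item] += 1 is modify item 0 (·+1)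
def clean_items (original : List String) : List String :=
  (original.foldl
    (fun (st : List String × PySem.Dict String Int) item =>
      let count := st.2.getD item 0
      let out := if count ≠ 0 then st.1 ++ [item ++ "_" ++ PySem.Int.toStr count]
                 else st.1 ++ [item]
      (out, st.2.modify item 0 (· + 1)))
    ([], PySem.Dict.empty)).1

-- ===== PORT B =====
-- literal port of Source B: build positions dict (setdefault/append over enumerate),
-- then scatter item / f"{item}_{k}" into a preallocated result list
def clean_items_alt (original : List String) : List String :=
  let positions : PySem.Dict String (List Int) :=
    (PySem.List.enumerate original 0).foldl
      (fun d p => d.modify p.2 [] (· ++ [p.1])) PySem.Dict.empty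
  let result0 : List String := PySem.List.pyRepeat [""] (original.length : Int)
  positions.items.foldl
    (fun result q =>
      (PySem.List.enumerate q.2 0).foldl
        (fun result r =>
          PySem.List.pySetD result r.2
            (if r.1 == 0 then q.1 else q.1 ++ "_" ++ PySem.Int.toStr r.1))
        result)
    result0

-- ===== PRECONDITION & SPEC =====
def Spec_clean_items (original : List String) (out : List String) : Prop := out = clean_items_alt original
instance (original : List String) (out : List String) : Decidable (Spec_clean_items original out) := by unfold Spec_clean_items; infer_instance

-- ===== CLAIM (what is proved, stated in full; the proofs are below) =====
def Claim_equal_clean_items : Prop := ∀ (original : List String), Dom_clean_items original → Spec_clean_items original (clean_items original)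

-- ===== LEMMAS AND PROOFS =====

-- rename an item by its number of earlier occurrences (the value both programs emit)
def renameI (k : String) (c : Int) : String :=
  if c ≠ 0 then k ++ "_" ++ PySem.Int.toStr c else k

-- A's loop, recursively: rename each item of `rest` by its count in the processed prefix `pre`
def cleanGo (pre rest : List String) : List String :=
  match rest with
  | [] => []
  | x :: xs => renameI x (pre.count x : Int) :: cleanGo (pre ++ [x]) xs

lemma clean_items_loop (rest : List String) :
    ∀ (pre acc : List String) (d : PySem.Dict String Int),
      (∀ s, d.getD s 0 = (pre.count s : Int)) →
      (rest.foldl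
        (fun (st : List String × PySem.Dict String Int) item =>
          let count := st.2.getD item 0
          let out := if count ≠ 0 then st.1 ++ [item ++ "_" ++ PySem.Int.toStr count]
                     else st.1 ++ [item]
          (out, st.2.modify item 0 (· + 1)))
        (acc, d)).1 = acc ++ cleanGo pre rest := by
  induction rest with
  | nil => intro pre acc d _; simp [cleanGo]
  | cons x xs ih =>
      intro pre acc d hd
      simp only [List.foldl_cons]
      have hmod : ∀ s, (d.modify x 0 (· + 1)).getD s 0 = ((pre ++ [x]).count s : Int) := by
        intro s
        have := PySem.Dict.getD_foldl_modify_add_one (l := [x]) (d := d) (v := s)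
        simp only [List.foldl_cons, List.foldl_nil] at this
        rw [this, hd, List.count_append]
        push_cast
        ring
      rw [ih (pre ++ [x]) _ _ hmod, hd x, cleanGo]
      by_cases h : pre.count x = 0 <;> simp [h, renameI]

lemma length_cleanGo (rest : List String) : ∀ pre, (cleanGo pre rest).length = rest.length := by
  induction rest with
  | nil => intro pre; simp [cleanGo]
  | cons x xs ih => intro pre; simp [cleanGo, ih]

lemma cleanGo_getElem? (rest : List String) :
    ∀ (pre : List String) (j : Nat) (hj : j < rest.length),
      (cleanGo pre rest)[j]? =
        some (renameI rest[j] (((pre ++ rest.take j).count rest[j] : Nat) : Int)) := by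
  induction rest with
  | nil => intro pre j hj; simp at hj
  | cons x xs ih =>
      intro pre j hj
      cases j with
      | zero => simp [cleanGo]
      | succ j' =>
          simp only [cleanGo, List.getElem?_cons_succ, List.getElem_cons_succ]
          rw [ih (pre ++ [x]) j' (by simpa using hj)]
          simp [List.append_assoc]

-- the list of positions of k in l, as enumerate-style Ints starting at s
def occIdxs (k : String) (l : List String) (s : Nat) : List Int :=
  ((PySem.List.enumerate l (s : Int)).filter (fun p => p.2 == k)).map (·.1)

lemma occIdxs_cons (k x : String) (l : List String) (s : Nat) :
    occIdxs k (x :: l) s = (if x == k then [(s : Int)] else []) ++ occIdxs k l (s + 1) := by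
  have hcast : (s : Int) + 1 = ((s + 1 : Nat) : Int) := by push_cast; ring
  simp only [occIdxs, PySem.List.enumerate_cons, List.filter_cons, hcast]
  by_cases h : x == k <;> simp [h]

lemma mem_occIdxs (k : String) (l : List String) :
    ∀ (s : Nat) (z : Int), z ∈ occIdxs k l s ↔
      ∃ j : Nat, ∃ hj : j < l.length, z = ((s + j : Nat) : Int) ∧ l[j] = k := by
  induction l with
  | nil => intro s z; simp [occIdxs, PySem.List.enumerate_nil]
  | cons x xs ih =>
      intro s z
      rw [occIdxs_cons]
      simp only [List.mem_append, ih (s + 1)]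
      constructor
      · rintro (h | ⟨j, hj, rfl, hk⟩)
        · by_cases hx : x == k
          · refine ⟨0, by simp, ?_, by simpa using hx⟩
            simp [hx] at h; omega
          · simp [hx] at h
        · exact ⟨j + 1, by simpa using Nat.succ_lt_succ hj, by push_cast; ring_nf, by simpa using hk⟩
      · rintro ⟨j, hj, rfl, hk⟩
        cases j with
        | zero => left; simp at hk; simp [hk]
        | succ j' =>
            right
            exact ⟨j', by simpa using Nat.lt_of_succ_lt_succ hj,
              by push_cast; ring_nf, by simpa using hk⟩

lemma occIdxs_getElem (k : String) (l : List String) :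
    ∀ (s : Nat) (m : Nat), m < (occIdxs k l s).length →
      ∃ j : Nat, ∃ hj : j < l.length,
        (occIdxs k l s)[m]? = some ((s + j : Nat) : Int) ∧ l[j] = k ∧ (l.take j).count k = m := by
  induction l with
  | nil => intro s m hm; simp [occIdxs, PySem.List.enumerate_nil] at hm
  | cons x xs ih =>
      intro s m hm
      by_cases hx : x == k
      · have hocc : occIdxs k (x :: xs) s = (s : Int) :: occIdxs k xs (s + 1) := by
          rw [occIdxs_cons]; simp [hx]
        cases m with
        | zero =>
            refine ⟨0, by simp, ?_, by simpa using hx, by simp⟩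
            simp [hocc]
        | succ m' =>
            have hm' : m' < (occIdxs k xs (s + 1)).length := by
              rw [hocc] at hm; simpa using hm
            obtain ⟨j, hj, helt, hk, hcnt⟩ := ih (s + 1) m' hm'
            refine ⟨j + 1, by simpa using Nat.succ_lt_succ hj, ?_, by simpa using hk, ?_⟩
            · rw [hocc, List.getElem?_cons_succ, helt]
              congr 2
              omega
            · have hxk : x = k := by simpa using hx
              simp [hxk, hcnt]
      · have hocc : occIdxs k (x :: xs) s = occIdxs k xs (s + 1) := by
          rw [occIdxs_cons]; simp [hx]
        rw [hocc] at hm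
        obtain ⟨j, hj, helt, hk, hcnt⟩ := ih (s + 1) m hm
        refine ⟨j + 1, by simpa using Nat.succ_lt_succ hj, ?_, by simpa using hk, ?_⟩
        · rw [hocc, helt]
          congr 2
          omega
        · have hxk : ¬ x = k := by simpa using hx
          simp [hxk, hcnt]

-- the inner scatter loop: writes Tf at every index of idxs, leaves everything else
lemma inner_fill (k : String) (Tf : Nat → String) :
    ∀ (idxs : List Int) (c : Nat) (res : List String),
      (∀ m, m < idxs.length → ∃ j : Nat,
          idxs[m]? = some (j : Int) ∧ j < res.length ∧ Tf j = renameI k ((c + m : Nat) : Int)) →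
      (((PySem.List.enumerate idxs (c : Int)).foldl
          (fun result r => PySem.List.pySetD result r.2
            (if r.1 == 0 then k else k ++ "_" ++ PySem.Int.toStr r.1)) res).length = res.length ∧
       ∀ j : Nat,
        ((PySem.List.enumerate idxs (c : Int)).foldl
          (fun result r => PySem.List.pySetD result r.2
            (if r.1 == 0 then k else k ++ "_" ++ PySem.Int.toStr r.1)) res)[j]? =
          if (j : Int) ∈ idxs then some (Tf j) else res[j]?) := by
  intro idxs
  induction idxs with
  | nil => intro c res _; simp [PySem.List.enumerate_nil]
  | cons i rest ih =>
      intro c res hyp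
      obtain ⟨j0, hi0', hj0len, hTf0⟩ := hyp 0 (by simp)
      have hi0 : i = (j0 : Int) := by simpa using hi0'
      have hval : (if (c : Int) == 0 then k else k ++ "_" ++ PySem.Int.toStr (c : Int))
          = Tf j0 := by
        rw [hTf0]
        by_cases hc : c = 0 <;> simp [hc, renameI]
      have hcast : (c : Int) + 1 = ((c + 1 : Nat) : Int) := by push_cast; ring
      simp only [PySem.List.enumerate_cons, List.foldl_cons, hi0, hval,
        PySem.List.pySetD_natCast, hcast]
      have hres' : (res.set j0 (Tf j0)).length = res.length := by simp
      have hyp' : ∀ m, m < rest.length → ∃ j : Nat,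
          rest[m]? = some (j : Int) ∧ j < (res.set j0 (Tf j0)).length ∧
          Tf j = renameI k ((c + 1 + m : Nat) : Int) := by
        intro m hm
        obtain ⟨j, hj1, hj2, hj3⟩ := hyp (m + 1) (by simpa using Nat.succ_lt_succ hm)
        simp only [List.getElem?_cons_succ] at hj1
        refine ⟨j, hj1, by simpa using hj2, ?_⟩
        rw [hj3]; congr 1; omega
      obtain ⟨ihlen, ihget⟩ := ih (c + 1) (res.set j0 (Tf j0)) hyp'
      refine ⟨by rw [ihlen, hres'], ?_⟩
      intro j
      rw [ihget j]
      have hset : (res.set j0 (Tf j0))[j]? = if j0 = j then some (Tf j) else res[j]? := by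
        by_cases hjj : j0 = j
        · subst hjj; simp [hj0len]
        · simp [hjj]
      by_cases hjr : (j : Int) ∈ rest
      · rw [if_pos hjr, if_pos (List.mem_cons.mpr (Or.inr hjr))]
      · rw [if_neg hjr, hset]
        by_cases hjj : j0 = j
        · rw [if_pos hjj, if_pos (List.mem_cons.mpr (Or.inl (by rw [hjj])))]
        · rw [if_neg hjj, if_neg (by
            simp only [List.mem_cons, not_or]
            exact ⟨by omega, hjr⟩)]

-- the target value both algorithms compute at position j
def TfO (original : List String) (j : Nat) : String :=
  renameI (original.getD j "") (((original.take j).count (original.getD j "") : Nat) : Int)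

-- the outer loop over a key list: fills every position whose item is in ks
lemma outer_fill (original : List String) :
    ∀ (ks res : List String), res.length = original.length →
      ((ks.foldl (fun result k =>
          (PySem.List.enumerate (occIdxs k original 0) 0).foldl
            (fun result r => PySem.List.pySetD result r.2
              (if r.1 == 0 then k else k ++ "_" ++ PySem.Int.toStr r.1)) result) res).length
        = original.length ∧
       ∀ j : Nat,
        (ks.foldl (fun result k =>
          (PySem.List.enumerate (occIdxs k original 0) 0).foldl
            (fun result r => PySem.List.pySetD result r.2
              (if r.1 == 0 then k else k ++ "_" ++ PySem.Int.toStr r.1)) result) res)[j]? =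
          if j < original.length ∧ original.getD j "" ∈ ks then some (TfO original j)
          else res[j]?) := by
  intro ks
  induction ks with
  | nil => intro res hlen; simp [hlen]
  | cons k ks' ih =>
      intro res hlen
      have hhyp : ∀ m, m < (occIdxs k original 0).length → ∃ j : Nat,
          (occIdxs k original 0)[m]? = some (j : Int) ∧ j < res.length ∧
          TfO original j = renameI k ((0 + m : Nat) : Int) := by
        intro m hm
        obtain ⟨j, hj, helt, hk, hcnt⟩ := occIdxs_getElem k original 0 m hm
        refine ⟨j, by simpa using helt, hlen ▸ hj, ?_⟩
        have hgd : original.getD j "" = k := by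
          rw [List.getD_eq_getElem?_getD, List.getElem?_eq_getElem hj, hk]; rfl
        rw [TfO, hgd, hcnt]
        congr 2
        omega
      have hinner := inner_fill k (TfO original) (occIdxs k original 0) 0 res hhyp
      simp only [Nat.cast_zero] at hinner
      obtain ⟨hilen, higet⟩ := hinner
      simp only [List.foldl_cons]
      obtain ⟨holen, hoget⟩ := ih _ (by rw [hilen, hlen])
      refine ⟨holen, ?_⟩
      intro j
      rw [hoget j, higet j]
      have hmemiff : (j : Int) ∈ occIdxs k original 0 ↔
          j < original.length ∧ original.getD j "" = k := by
        rw [mem_occIdxs]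
        constructor
        · rintro ⟨j', hj', heq, hk⟩
          have : j = j' := by simpa using heq
          subst this
          exact ⟨hj', by rw [List.getD_eq_getElem?_getD, List.getElem?_eq_getElem hj', hk]; rfl⟩
        · rintro ⟨hj, hk⟩
          refine ⟨j, hj, by push_cast; ring, ?_⟩
          rw [List.getD_eq_getElem?_getD, List.getElem?_eq_getElem hj] at hk
          exact hk
      by_cases hjn : j < original.length
      · have hgd : original.getD j "" = original[j] := by
          rw [List.getD_eq_getElem?_getD, List.getElem?_eq_getElem hjn]; rfl
        by_cases h1 : original[j] ∈ ks'
        · rw [if_pos ⟨hjn, by rw [hgd]; exact h1⟩,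
            if_pos ⟨hjn, by rw [hgd]; exact List.mem_cons.mpr (Or.inr h1)⟩]
        · rw [if_neg (by rintro ⟨_, hm⟩; rw [hgd] at hm; exact h1 hm)]
          by_cases h2 : original[j] = k
          · rw [if_pos (hmemiff.mpr ⟨hjn, by rw [hgd]; exact h2⟩),
              if_pos ⟨hjn, by rw [hgd]; exact List.mem_cons.mpr (Or.inl h2)⟩]
          · rw [if_neg (fun hm => h2 (by
                have := (hmemiff.mp hm).2
                rw [hgd] at this
                exact this)),
              if_neg (by
                rintro ⟨_, hm⟩
                rw [hgd] at hm
                rcases List.mem_cons.mp hm with h | h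
                · exact h2 h
                · exact h1 h)]
      · rw [if_neg (fun h => hjn h.1), if_neg (fun hm => hjn (hmemiff.mp hm).1),
          if_neg (fun h => hjn h.1)]

-- the positions dict built by B's first pass, characterised
lemma positions_items (original : List String) :
    ((PySem.List.enumerate original 0).foldl
        (fun d p => d.modify p.2 [] (· ++ [p.1])) PySem.Dict.empty).items
      = (PySem.Set.ofList original).map (fun k => (k, occIdxs k original 0)) := by
  have hkeys : ((PySem.List.enumerate original 0).foldl
      (fun d p => d.modify p.2 [] (· ++ [p.1])) PySem.Dict.empty).keys
      = PySem.Set.ofList original := by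
    rw [PySem.Dict.keys_foldl_modify_key (PySem.List.enumerate original 0) (·.2) []
      (fun _ p => (· ++ [p.1])) PySem.Dict.empty]
    simp [PySem.List.map_snd_enumerate, PySem.Set.update, PySem.Set.ofList]
  have hnodup : ((PySem.List.enumerate original 0).foldl
      (fun d p => d.modify p.2 [] (· ++ [p.1])) PySem.Dict.empty).keys.Nodup := by
    apply PySem.Dict.nodup_keys_foldl_modify_key (PySem.List.enumerate original 0) (·.2) []
      (fun _ p => (· ++ [p.1]))
    simp [PySem.Dict.keys, PySem.Dict.empty]
  have hgetD : ∀ c, ((PySem.List.enumerate original 0).foldl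
      (fun d p => d.modify p.2 [] (· ++ [p.1])) PySem.Dict.empty).getD c []
      = occIdxs c original 0 := by
    intro c
    have hswap : (PySem.List.enumerate original 0).foldl
        (fun d p => d.modify p.2 [] (· ++ [p.1])) PySem.Dict.empty
        = ((PySem.List.enumerate original 0).map (fun p => (p.2, p.1))).foldl
            (fun d p => d.modify p.1 [] (· ++ [p.2])) PySem.Dict.empty := by
      rw [List.foldl_map]
    rw [hswap, PySem.Dict.getD_foldl_modify_append]
    simp [occIdxs, List.filter_map, Function.comp_def]
  rw [PySem.Dict.items_eq_map_keys _ hnodup [], hkeys]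
  apply List.map_congr_left
  intro k _
  rw [hgetD k]

lemma main_eq (original : List String) : clean_items original = clean_items_alt original := by
  unfold clean_items clean_items_alt
  rw [clean_items_loop original [] [] PySem.Dict.empty (by intro s; simp [PySem.Dict.getD])]
  simp only [List.nil_append]
  rw [positions_items original, List.foldl_map]
  have hrep : (PySem.List.pyRepeat [""] (original.length : Int) : List String)
      = List.replicate original.length "" := by
    rw [PySem.List.pyRepeat_singleton]; simp
  rw [hrep]
  obtain ⟨hlen, hget⟩ := outer_fill original (PySem.Set.ofList original)
    (List.replicate original.length "") (by simp)
  have key : cleanGo [] original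
      = ((PySem.Set.ofList original : List String).foldl (fun result k =>
          (PySem.List.enumerate (occIdxs k original 0) 0).foldl
            (fun result r => PySem.List.pySetD result r.2
              (if r.1 == 0 then k else k ++ "_" ++ PySem.Int.toStr r.1)) result)
          (List.replicate original.length "")) := by
    apply List.ext_getElem?
    intro j
    rw [hget j]
    by_cases hj : j < original.length
    · rw [cleanGo_getElem? original [] j hj]
      simp [hj, TfO]
    · have h1 : (cleanGo [] original)[j]? = none := by
        rw [List.getElem?_eq_none]
        rw [length_cleanGo]
        omega
      rw [h1]
      simp [Nat.le_of_not_lt hj]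
  exact key

-- ===== VERDICT (by name: the statement is the Claim_ definition above) =====
theorem clean_items_spec : Claim_equal_clean_items := by
  intro original _
  exact main_eq original
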